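-- pv_equiv track=rewrite | github.com/seokulee/algorithm-study | parkkyungwon/w11/2629 양팔저울.py | dp
-- ===== SOURCE A (Python) =====
-- from collections import defaultdict
--
-- def dp(weights, balls):
--     dup = defaultdict(set)
--     L = len(weights)
--
--     def f(i, current):
--         if current in dup[i]:
--             return
--
--         dup[i].add(current)
--
--         if i == L:
--             return
--
--         f(i+1, abs(current - weights[i]))
--         f(i+1, current)
--         f(i+1, current + weights[i])
--
--     f(0, 0)
--     dup = set(v for vs in dup.values() for v in vs)
--
--     return ' '.join('Y' if ball in dup else 'N' for ball in balls)
-- ===== SOURCE B (Python) =====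
-- def dp(weights, balls):
--     reachable = {0}
--     for w in weights:
--         reachable = {v for c in reachable for v in (abs(c - w), c, c + w)}
--     return ' '.join('Y' if b in reachable else 'N' for b in balls)
-- ===== Notes on version B (the rewrite author's own statement) =====
-- stated objective: simpler
-- what changed: Replaced the recursive memoized DFS over (level, value) states collected in a defaultdict of sets by an iterative set DP: fold over the weights keeping one reachable-set, relying on the keep-branch making the final level equal to the union over all levels.
import Mathlib
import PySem

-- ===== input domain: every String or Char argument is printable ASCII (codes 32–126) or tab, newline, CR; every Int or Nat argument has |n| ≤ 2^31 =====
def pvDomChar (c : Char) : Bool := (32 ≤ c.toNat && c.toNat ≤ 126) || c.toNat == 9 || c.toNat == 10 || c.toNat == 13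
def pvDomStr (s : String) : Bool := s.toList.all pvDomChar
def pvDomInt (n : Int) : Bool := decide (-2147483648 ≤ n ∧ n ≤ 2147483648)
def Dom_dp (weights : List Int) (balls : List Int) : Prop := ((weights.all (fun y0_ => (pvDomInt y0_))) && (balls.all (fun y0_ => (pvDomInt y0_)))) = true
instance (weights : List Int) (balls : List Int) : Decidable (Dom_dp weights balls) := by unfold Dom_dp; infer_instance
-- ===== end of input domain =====

-- B replaces A's recursive memoized DFS over (level, value) states by an iterative fold of one reachable-set over the weights (simpler); same return value.

-- ===== PORT A =====
-- membership test 'current in dup[i]' on the defaultdict(set)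
def dpMem (d : PySem.Dict Int (PySem.Set Int)) (i : Int) (c : Int) : Bool :=
  PySem.Set.contains (d.getD i []) c

-- the inner recursive f(i, current); 'rem' is weights[i:], so the 'i == L' test is 'rem = []';
-- 'dup[i].add(current)' on the defaultdict is get-or-default-then-store = Dict.modify
def dpF : List Int → Nat → Int → PySem.Dict Int (PySem.Set Int) → PySem.Dict Int (PySem.Set Int)
  | [], i, c, d =>
      if dpMem d (i : Int) c then d
      else d.modify (i : Int) [] (fun s => PySem.Set.add s c)
  | w :: t, i, c, d =>
      if dpMem d (i : Int) c then d
      else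
        let d' := d.modify (i : Int) [] (fun s => PySem.Set.add s c)
        let d1 := dpF t (i+1) |c - w| d'
        let d2 := dpF t (i+1) c d1
        dpF t (i+1) (c + w) d2

def dp (weights : List Int) (balls : List Int) : String :=
  let d := dpF weights 0 0 PySem.Dict.empty
  let dup : PySem.Set Int := PySem.Set.ofList (d.values.flatMap (fun vs => vs))
  PySem.Str.join " " (balls.map (fun ball => if PySem.Set.contains dup ball then "Y" else "N"))

-- ===== PORT B =====
def dpStep (s : PySem.Set Int) (w : Int) : PySem.Set Int :=
  PySem.Set.ofList (s.flatMap (fun c => [|c - w|, c, c + w]))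

def dp_alt (weights : List Int) (balls : List Int) : String :=
  let reachable := weights.foldl dpStep (PySem.Set.ofList [0])
  PySem.Str.join " " (balls.map (fun b => if PySem.Set.contains reachable b then "Y" else "N"))

-- ===== PRECONDITION & SPEC =====
def Spec_dp (weights : List Int) (balls : List Int) (out : String) : Prop := out = dp_alt weights balls
instance (weights : List Int) (balls : List Int) (out : String) : Decidable (Spec_dp weights balls out) := by unfold Spec_dp; infer_instance

-- ===== CLAIM (what is proved, stated in full; the proofs are below) =====
def Claim_equal_dp : Prop := ∀ (weights : List Int) (balls : List Int), Dom_dp weights balls → Spec_dp weights balls (dp weights balls)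

-- ===== LEMMAS AND PROOFS =====

-- level j of the dict contains value x
def memD (d : PySem.Dict Int (PySem.Set Int)) (j : Nat) (x : Int) : Prop :=
  x ∈ d.getD (j : Int) []

-- descendants of value c through the remaining weights, indexed by depth
def Desc : List Int → Int → Nat → Int → Prop
  | [], c, k, x => k = 0 ∧ x = c
  | w :: t, c, k, x =>
      (k = 0 ∧ x = c) ∨ ∃ k', k = k' + 1 ∧ (Desc t |c - w| k' x ∨ Desc t c k' x ∨ Desc t (c + w) k' x)

-- values reachable at the FINAL level
def FinR : Int → List Int → Int → Prop
  | c, [], x => x = c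
  | c, w :: t, x => FinR |c - w| t x ∨ FinR c t x ∨ FinR (c + w) t x

-- every dict entry at level ≥ n already has its three children recorded
def ClosedAbove (ws : List Int) (n : Nat) (d : PySem.Dict Int (PySem.Set Int)) : Prop :=
  ∀ j, n ≤ j → ∀ w t x, ws.drop j = w :: t → memD d j x →
    memD d (j+1) |x - w| ∧ memD d (j+1) x ∧ memD d (j+1) (x + w)

theorem dpMem_iff (d : PySem.Dict Int (PySem.Set Int)) (i : Nat) (c : Int) :
    dpMem d (i : Int) c = true ↔ memD d i c :=
  PySem.Set.contains_iff _ _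

theorem memD_modify (d : PySem.Dict Int (PySem.Set Int)) (i j : Nat) (c x : Int) :
    memD (d.modify (i : Int) [] (fun s => PySem.Set.add s c)) j x ↔ memD d j x ∨ (j = i ∧ x = c) := by
  unfold memD
  rw [PySem.Dict.getD_modify]
  split_ifs with h
  · rw [Nat.cast_inj] at h
    subst h
    simp [PySem.Set.mem_add]
  · rw [Nat.cast_inj] at h
    tauto

theorem closedAbove_mono (ws : List Int) (n m : Nat) (d : PySem.Dict Int (PySem.Set Int))
    (h : ClosedAbove ws n d) (hnm : n ≤ m) : ClosedAbove ws m d := by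
  intro j hj; exact h j (le_trans hnm hj)

theorem drop_cons_succ (ws : List Int) (i : Nat) (w : Int) (t : List Int)
    (h : ws.drop i = w :: t) : ws.drop (i+1) = t := by
  have h2 := congrArg (List.drop 1) h
  rw [List.drop_drop] at h2
  simpa [Nat.add_comm] using h2

theorem desc_zero (t : List Int) (c : Int) : Desc t c 0 c := by
  cases t <;> simp [Desc]

-- a closed dict already contains every descendant of a recorded state
theorem closed_desc (ws : List Int) : ∀ (rem : List Int) (i : Nat) (c : Int)
    (d : PySem.Dict Int (PySem.Set Int)), ws.drop i = rem → ClosedAbove ws i d → memD d i c →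
    ∀ k x, Desc rem c k x → memD d (i + k) x := by
  intro rem
  induction rem with
  | nil =>
    rintro i c d _ _ hmem k x ⟨rfl, rfl⟩
    simpa using hmem
  | cons w t ih =>
    rintro i c d hdrop hcl hmem k x (⟨rfl, rfl⟩ | ⟨k', rfl, hbr⟩)
    · simpa using hmem
    · obtain ⟨h1, h2, h3⟩ := hcl i le_rfl w t c hdrop hmem
      have hdrop' := drop_cons_succ ws i w t hdrop
      have hcl' := closedAbove_mono ws i (i+1) d hcl (by omega)
      have hgoal : i + (k' + 1) = (i + 1) + k' := by omega
      rw [hgoal]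
      rcases hbr with h | h | h
      · exact ih (i+1) _ d hdrop' hcl' h1 k' x h
      · exact ih (i+1) _ d hdrop' hcl' h2 k' x h
      · exact ih (i+1) _ d hdrop' hcl' h3 k' x h

-- the main invariant of A's DFS: monotone, closure-preserving, sound and complete
theorem dpF_main (ws : List Int) : ∀ (rem : List Int) (i : Nat) (c : Int)
    (d : PySem.Dict Int (PySem.Set Int)), ws.drop i = rem → ClosedAbove ws i d →
    (∀ j x, memD d j x → memD (dpF rem i c d) j x) ∧
    ClosedAbove ws i (dpF rem i c d) ∧
    (∀ j x, memD (dpF rem i c d) j x → memD d j x ∨ ∃ k, j = i + k ∧ Desc rem c k x) ∧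
    (∀ k x, Desc rem c k x → memD (dpF rem i c d) (i + k) x) := by
  intro rem
  induction rem with
  | nil =>
    intro i c d hdrop hcl
    by_cases hm : dpMem d (i : Int) c = true
    · rw [show dpF [] i c d = d by simp [dpF, hm]]
      refine ⟨fun j x h => h, hcl, fun j x h => Or.inl h, ?_⟩
      rintro k x ⟨rfl, rfl⟩
      simpa using (dpMem_iff d i x).mp hm
    · rw [show dpF [] i c d = d.modify (i : Int) [] (fun s => PySem.Set.add s c) by simp [dpF, hm]]
      refine ⟨fun j x h => (memD_modify d i j c x).mpr (Or.inl h), ?_, ?_, ?_⟩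
      · intro j hj w t x hdropj hmem
        rcases (memD_modify d i j c x).mp hmem with h | ⟨rfl, rfl⟩
        · obtain ⟨h1, h2, h3⟩ := hcl j hj w t x hdropj h
          exact ⟨(memD_modify d i _ c _).mpr (Or.inl h1),
                 (memD_modify d i _ c _).mpr (Or.inl h2),
                 (memD_modify d i _ c _).mpr (Or.inl h3)⟩
        · rw [hdrop] at hdropj
          cases hdropj
      · intro j x h
        rcases (memD_modify d i j c x).mp h with h | ⟨rfl, rfl⟩
        · exact Or.inl h
        · exact Or.inr ⟨0, by omega, rfl, rfl⟩
      · rintro k x ⟨rfl, rfl⟩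
        have := (memD_modify d i i x x).mpr (Or.inr ⟨rfl, rfl⟩)
        simpa using this
  | cons w t ih =>
    intro i c d hdrop hcl
    by_cases hm : dpMem d (i : Int) c = true
    · rw [show dpF (w :: t) i c d = d by simp [dpF, hm]]
      exact ⟨fun j x h => h, hcl, fun j x h => Or.inl h,
             fun k x h => closed_desc ws (w :: t) i c d hdrop hcl ((dpMem_iff d i c).mp hm) k x h⟩
    · have hdpF : dpF (w :: t) i c d =
          dpF t (i+1) (c + w)
            (dpF t (i+1) c
              (dpF t (i+1) |c - w| (d.modify (i : Int) [] (fun s => PySem.Set.add s c)))) := by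
        simp [dpF, hm]
      set d' := d.modify (i : Int) [] (fun s => PySem.Set.add s c) with hd'
      have hdrop' := drop_cons_succ ws i w t hdrop
      have hcl' : ClosedAbove ws (i+1) d' := by
        intro j hj w' t' x hdropj hmem
        rcases (memD_modify d i j c x).mp hmem with h | ⟨rfl, _⟩
        · obtain ⟨h1, h2, h3⟩ := hcl j (by omega) w' t' x hdropj h
          exact ⟨(memD_modify d i _ c _).mpr (Or.inl h1),
                 (memD_modify d i _ c _).mpr (Or.inl h2),
                 (memD_modify d i _ c _).mpr (Or.inl h3)⟩
        · omega
      obtain ⟨m1, c1, s1, p1⟩ := ih (i+1) |c - w| d' hdrop' hcl'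
      set d1 := dpF t (i+1) |c - w| d' with hd1
      obtain ⟨m2, c2, s2, p2⟩ := ih (i+1) c d1 hdrop' c1
      set d2 := dpF t (i+1) c d1 with hd2
      obtain ⟨m3, c3, s3, p3⟩ := ih (i+1) (c + w) d2 hdrop' c2
      rw [hdpF]
      set r := dpF t (i+1) (c + w) d2 with hr
      have hmono : ∀ j x, memD d j x → memD r j x := fun j x h =>
        m3 _ _ (m2 _ _ (m1 _ _ ((memD_modify d i j c x).mpr (Or.inl h))))
      have hmono' : ∀ j x, memD d' j x → memD r j x := fun j x h => m3 _ _ (m2 _ _ (m1 _ _ h))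
      have hcnew1 : memD r (i+1) |c - w| := by
        have := p1 0 |c - w| (desc_zero t _)
        rw [Nat.add_zero] at this
        exact m3 _ _ (m2 _ _ this)
      have hcnew2 : memD r (i+1) c := by
        have := p2 0 c (desc_zero t _)
        rw [Nat.add_zero] at this
        exact m3 _ _ this
      have hcnew3 : memD r (i+1) (c + w) := by
        have := p3 0 (c + w) (desc_zero t _)
        rw [Nat.add_zero] at this
        exact this
      refine ⟨hmono, ?_, ?_, ?_⟩
      · -- closure
        intro j hj w' t' x hdropj hmemr
        by_cases hji : i + 1 ≤ j
        · exact c3 j hji w' t' x hdropj hmemr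
        · have hji' : j = i := by omega
          subst hji'
          rw [hdrop] at hdropj
          obtain ⟨rfl, rfl⟩ : w = w' ∧ t = t' := by
            injection hdropj with h1 h2
            exact ⟨h1, h2⟩
          -- x at level j: trace it back through the three calls to d'
          have hx : memD d' j x := by
            rcases s3 j x hmemr with h | ⟨k, hk, _⟩
            · rcases s2 j x h with h' | ⟨k, hk, _⟩
              · rcases s1 j x h' with h'' | ⟨k, hk, _⟩
                · exact h''
                · omega
              · omega
            · omega
          rcases (memD_modify d j j c x).mp hx with h | ⟨_, rfl⟩
          · obtain ⟨h1, h2, h3⟩ := hcl j le_rfl w t x hdrop h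
            exact ⟨hmono _ _ h1, hmono _ _ h2, hmono _ _ h3⟩
          · exact ⟨hcnew1, hcnew2, hcnew3⟩
      · -- soundness
        intro j x h
        rcases s3 j x h with h2' | ⟨k, rfl, hdsc⟩
        · rcases s2 j x h2' with h1' | ⟨k, rfl, hdsc⟩
          · rcases s1 j x h1' with h0' | ⟨k, rfl, hdsc⟩
            · rcases (memD_modify d i j c x).mp h0' with h | ⟨rfl, rfl⟩
              · exact Or.inl h
              · exact Or.inr ⟨0, by omega, Or.inl ⟨rfl, rfl⟩⟩
            · exact Or.inr ⟨k + 1, by omega, Or.inr ⟨k, rfl, Or.inl hdsc⟩⟩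
          · exact Or.inr ⟨k + 1, by omega, Or.inr ⟨k, rfl, Or.inr (Or.inl hdsc)⟩⟩
        · exact Or.inr ⟨k + 1, by omega, Or.inr ⟨k, rfl, Or.inr (Or.inr hdsc)⟩⟩
      · -- completeness
        rintro k x (⟨rfl, rfl⟩ | ⟨k', rfl, hbr⟩)
        · have := hmono' i x ((memD_modify d i i x x).mpr (Or.inr ⟨rfl, rfl⟩))
          simpa using this
        · have hgoal : i + (k' + 1) = (i + 1) + k' := by omega
          rw [hgoal]
          rcases hbr with h | h | h
          · exact m3 _ _ (m2 _ _ (p1 k' x h))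
          · exact m3 _ _ (p2 k' x h)
          · exact p3 k' x h

theorem finR_self (c : Int) (ws : List Int) : FinR c ws c := by
  induction ws generalizing c with
  | nil => simp [FinR]
  | cons w t ih => exact Or.inr (Or.inl (ih c))

theorem desc_iff_fin (ws : List Int) : ∀ (c x : Int), (∃ k, Desc ws c k x) ↔ FinR c ws x := by
  induction ws with
  | nil =>
    intro c x
    constructor
    · rintro ⟨k, rfl, rfl⟩; simp [FinR]
    · intro h; exact ⟨0, rfl, h⟩
  | cons w t ih =>
    intro c x
    constructor
    · rintro ⟨k, (⟨rfl, rfl⟩ | ⟨k', rfl, h | h | h⟩)⟩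
      · exact finR_self _ (w :: t)
      · exact Or.inl ((ih _ x).mp ⟨k', h⟩)
      · exact Or.inr (Or.inl ((ih _ x).mp ⟨k', h⟩))
      · exact Or.inr (Or.inr ((ih _ x).mp ⟨k', h⟩))
    · rintro (h | h | h)
      · obtain ⟨k, hk⟩ := (ih _ x).mpr h; exact ⟨k+1, Or.inr ⟨k, rfl, Or.inl hk⟩⟩
      · obtain ⟨k, hk⟩ := (ih _ x).mpr h; exact ⟨k+1, Or.inr ⟨k, rfl, Or.inr (Or.inl hk)⟩⟩
      · obtain ⟨k, hk⟩ := (ih _ x).mpr h; exact ⟨k+1, Or.inr ⟨k, rfl, Or.inr (Or.inr hk)⟩⟩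

theorem mem_dpStep (s : PySem.Set Int) (w x : Int) :
    x ∈ dpStep s w ↔ ∃ c ∈ s, x = |c - w| ∨ x = c ∨ x = c + w := by
  simp [dpStep, PySem.Set.mem_ofList, List.mem_flatMap]

theorem mem_foldl_step (ws : List Int) : ∀ (S : PySem.Set Int) (x : Int),
    x ∈ ws.foldl dpStep S ↔ ∃ c ∈ S, FinR c ws x := by
  induction ws with
  | nil =>
    intro S x
    simp only [List.foldl_nil, FinR]
    constructor
    · intro h; exact ⟨x, h, rfl⟩
    · rintro ⟨c, hc, rfl⟩; exact hc
  | cons w t ih =>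
    intro S x
    simp only [List.foldl_cons, ih]
    constructor
    · rintro ⟨c, hc, hf⟩
      rw [mem_dpStep] at hc
      obtain ⟨c0, hc0, hor⟩ := hc
      obtain h1 | h1 | h1 := hor <;> subst h1
      · exact ⟨_, hc0, Or.inl hf⟩
      · exact ⟨_, hc0, Or.inr (Or.inl hf)⟩
      · exact ⟨_, hc0, Or.inr (Or.inr hf)⟩
    · rintro ⟨c, hc, (h | h | h)⟩
      · exact ⟨|c - w|, (mem_dpStep S w _).mpr ⟨c, hc, Or.inl rfl⟩, h⟩
      · exact ⟨c, (mem_dpStep S w _).mpr ⟨c, hc, Or.inr (Or.inl rfl)⟩, h⟩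
      · exact ⟨c + w, (mem_dpStep S w _).mpr ⟨c, hc, Or.inr (Or.inr rfl)⟩, h⟩

theorem keys_nodup_modify (d : PySem.Dict Int (PySem.Set Int)) (k : Int) (f : PySem.Set Int → PySem.Set Int)
    (h : d.keys.Nodup) : (d.modify k [] f).keys.Nodup := by
  rw [PySem.Dict.keys_modify]
  exact PySem.Dict.nodup_keys_insert d _ _ h

theorem dpF_keys_nodup : ∀ (rem : List Int) (i : Nat) (c : Int) (d : PySem.Dict Int (PySem.Set Int)),
    d.keys.Nodup → (dpF rem i c d).keys.Nodup := by
  intro rem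
  induction rem with
  | nil =>
    intro i c d h
    by_cases hm : dpMem d (i : Int) c = true <;> simp [dpF, hm]
    · exact h
    · exact PySem.Dict.nodup_keys_insert d _ _ h
  | cons w t ih =>
    intro i c d h
    by_cases hm : dpMem d (i : Int) c = true <;> simp [dpF, hm]
    · exact h
    · exact ih _ _ _ (ih _ _ _ (ih _ _ _ (keys_nodup_modify d _ _ h)))

theorem mem_keys_modify (d : PySem.Dict Int (PySem.Set Int)) (k kk : Int) (f : PySem.Set Int → PySem.Set Int)
    (h : kk ∈ (d.modify k [] f).keys) : kk = k ∨ kk ∈ d.keys := by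
  rw [PySem.Dict.keys_modify] at h
  exact (PySem.Dict.mem_keys_insert d _ _ _).mp h

theorem dpF_keys_nat : ∀ (rem : List Int) (i : Nat) (c : Int) (d : PySem.Dict Int (PySem.Set Int)),
    (∀ kk ∈ d.keys, ∃ j : Nat, kk = (j : Int)) →
    ∀ kk ∈ (dpF rem i c d).keys, ∃ j : Nat, kk = (j : Int) := by
  intro rem
  induction rem with
  | nil =>
    intro i c d h
    by_cases hm : dpMem d (i : Int) c = true <;> simp only [dpF, hm, Bool.false_eq_true, reduceIte]
    · exact h
    · intro kk hk
      rcases mem_keys_modify d _ kk _ hk with rfl | hk'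
      · exact ⟨i, rfl⟩
      · exact h kk hk'
  | cons w t ih =>
    intro i c d h
    by_cases hm : dpMem d (i : Int) c = true <;> simp only [dpF, hm, Bool.false_eq_true, reduceIte]
    · exact h
    · refine ih _ _ _ (ih _ _ _ (ih _ _ _ ?_))
      intro kk hk
      rcases mem_keys_modify d _ kk _ hk with rfl | hk'
      · exact ⟨i, rfl⟩
      · exact h kk hk'

theorem mem_values_iff (d : PySem.Dict Int (PySem.Set Int)) (hnd : d.keys.Nodup) (x : Int) :
    x ∈ d.values.flatMap (fun vs => vs) ↔ ∃ kk : Int, x ∈ d.getD kk [] := by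
  constructor
  · intro h
    rw [List.mem_flatMap] at h
    obtain ⟨vs, hvs, hx⟩ := h
    have : ∃ p ∈ d.items, p.2 = vs := by
      simpa [PySem.Dict.values, List.mem_map] using hvs
    obtain ⟨⟨k, v⟩, hp, rfl⟩ := this
    exact ⟨k, by rw [PySem.Dict.getD_of_mem_items d hp hnd]; exact hx⟩
  · rintro ⟨kk, hx⟩
    rw [List.mem_flatMap]
    cases hg : d.get? kk with
    | none =>
      rw [PySem.Dict.getD_of_get?_eq_none d [] hg] at hx
      cases hx
    | some vs =>
      refine ⟨vs, ?_, ?_⟩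
      · have hmem := PySem.Dict.mem_items_of_get?_eq_some d hg
        simp only [PySem.Dict.values]
        exact List.mem_map.mpr ⟨(kk, vs), hmem, rfl⟩
      · rw [PySem.Dict.getD_eq_get?_getD, hg] at hx
        exact hx

-- the two final sets admit the same elements
theorem final_set_iff (ws : List Int) (x : Int) :
    x ∈ (dpF ws 0 0 PySem.Dict.empty).values.flatMap (fun vs => vs) ↔
    x ∈ ws.foldl dpStep (PySem.Set.ofList [0]) := by
  have hnd : (dpF ws 0 0 PySem.Dict.empty).keys.Nodup := by
    apply dpF_keys_nodup
    rw [PySem.Dict.keys_empty]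
    exact List.nodup_nil
  have hclE : ClosedAbove ws 0 (PySem.Dict.empty : PySem.Dict Int (PySem.Set Int)) := by
    intro j _ w t y _ hmem
    exact absurd hmem (by simp [memD, PySem.Dict.getD_empty])
  obtain ⟨_, _, hs, hp⟩ := dpF_main ws ws 0 0 PySem.Dict.empty rfl hclE
  rw [mem_values_iff _ hnd x, mem_foldl_step]
  constructor
  · rintro ⟨kk, hx⟩
    -- every key of the DFS dict is a natural number
    have hmemD : ∃ j : Nat, memD (dpF ws 0 0 PySem.Dict.empty) j x := by
      have hkey : kk ∈ (dpF ws 0 0 PySem.Dict.empty).keys := by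
        by_contra hk
        rw [PySem.Dict.getD_of_get?_eq_none _ []
          ((PySem.Dict.get?_eq_none_iff_not_mem_keys _ _).mpr hk)] at hx
        cases hx
      obtain ⟨j, rfl⟩ := dpF_keys_nat ws 0 0 PySem.Dict.empty
        (by rw [PySem.Dict.keys_empty]; intro kk hk; cases hk) kk hkey
      exact ⟨j, hx⟩
    obtain ⟨j, hj⟩ := hmemD
    rcases hs j x hj with h | ⟨k, _, hdsc⟩
    · exact absurd h (by simp [memD, PySem.Dict.getD_empty])
    · exact ⟨0, by simp [PySem.Set.mem_ofList], (desc_iff_fin ws 0 x).mp ⟨k, hdsc⟩⟩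
  · rintro ⟨c, hc, hf⟩
    have hc0 : c = 0 := by simpa [PySem.Set.mem_ofList] using hc
    subst hc0
    obtain ⟨k, hdsc⟩ := (desc_iff_fin ws 0 x).mpr hf
    exact ⟨(k : Int), by simpa [memD] using hp k x hdsc⟩

-- ===== VERDICT (by name: the statement is the Claim_ definition above) =====
theorem dp_spec : Claim_equal_dp := by
  intro weights balls _
  unfold Spec_dp dp dp_alt
  dsimp only
  congr 1
  apply List.map_congr_left
  intro b _
  have h := final_set_iff weights b
  have : PySem.Set.contains (PySem.Set.ofList ((dpF weights 0 0 PySem.Dict.empty).values.flatMap (fun vs => vs))) b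
       = PySem.Set.contains (weights.foldl dpStep (PySem.Set.ofList [0])) b := by
    rw [Bool.eq_iff_iff, PySem.Set.contains_iff, PySem.Set.contains_iff, PySem.Set.mem_ofList]
    exact h
  rw [this]
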